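-- pv_equiv track=rewrite | github.com/usm441/Scientific-paper-Recommender-System | Code/MasterProject/AlgorithmsManager/algorithms/ContentBasedFiltering/ContentBasedFiltering.py | get_masking_dict
-- ===== SOURCE A (Python) =====
-- def get_masking_dict(total_docs_without_user_docs, user_docs):
--     masking_dict = dict()
--     actual_index = total_docs_without_user_docs + len(user_docs) - 1
--     for i in reversed(range(total_docs_without_user_docs)):
--         while actual_index in user_docs:
--             actual_index -= 1
--         masking_dict[i] = actual_index
--         actual_index -= 1
--     return masking_dict
-- ===== SOURCE B (Python) =====
-- def get_masking_dict(total_docs_without_user_docs, user_docs):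
--     valid = [x for x in range(total_docs_without_user_docs + len(user_docs))
--              if x not in user_docs]
--     tail = valid[len(valid) - total_docs_without_user_docs:]
--     return dict(zip(reversed(range(total_docs_without_user_docs)), reversed(tail)))
-- ===== Notes on version B (the rewrite author's own statement) =====
-- stated objective: alternative
-- what changed: A walks a pointer top-down with a while-skip per key; B instead filters the full index range once into the list of surviving indices, takes its tail and zips it (reversed) with the keys.
import Mathlib
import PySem

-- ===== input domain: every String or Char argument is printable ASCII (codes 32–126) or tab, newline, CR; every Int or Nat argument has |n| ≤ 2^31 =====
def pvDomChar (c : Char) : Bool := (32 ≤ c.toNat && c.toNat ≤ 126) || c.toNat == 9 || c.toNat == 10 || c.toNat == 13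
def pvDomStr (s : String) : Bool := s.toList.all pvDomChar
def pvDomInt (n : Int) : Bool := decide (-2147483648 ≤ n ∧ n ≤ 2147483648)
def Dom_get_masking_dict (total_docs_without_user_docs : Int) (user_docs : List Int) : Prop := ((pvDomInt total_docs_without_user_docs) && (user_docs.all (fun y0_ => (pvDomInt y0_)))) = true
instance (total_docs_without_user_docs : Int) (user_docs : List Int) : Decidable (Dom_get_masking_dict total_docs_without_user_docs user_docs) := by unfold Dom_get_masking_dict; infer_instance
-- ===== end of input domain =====

-- B replaces A's top-down pointer walk (a while-skip per key) by one filter pass collecting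
-- the surviving indices, whose tail is zipped (reversed) with the keys (objective:
-- alternative decomposition; same asymptotic cost).

-- ===== PORT A =====
-- A's 'while actual_index in user_docs: actual_index -= 1' loop; fuel = len(user_docs)+1
-- always suffices (at most len(user_docs) consecutive integers can be members of
-- user_docs), so this is exact for every input.
def pySkip (user_docs : List Int) : Nat → Int → Int
  | 0, a => a
  | fuel+1, a => if user_docs.contains a then pySkip user_docs fuel (a-1) else a

def get_masking_dict (total_docs_without_user_docs : Int) (user_docs : List Int) : List (Int × Int) :=
  (((PySem.List.pyRange 0 total_docs_without_user_docs 1).reverse).foldl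
    (fun (st : PySem.Dict Int Int × Int) i =>
      let actual_index := pySkip user_docs (user_docs.length + 1) st.2
      (st.1.insert i actual_index, actual_index - 1))
    (PySem.Dict.empty, total_docs_without_user_docs + user_docs.length - 1)).1.items

-- ===== PORT B =====
def get_masking_dict_alt (total_docs_without_user_docs : Int) (user_docs : List Int) : List (Int × Int) :=
  let valid := (PySem.List.pyRange 0 (total_docs_without_user_docs + user_docs.length) 1).filter
    (fun x => !(user_docs.contains x))
  let tail := PySem.List.slice valid (some ((valid.length : Int) - total_docs_without_user_docs)) none
  ((((PySem.List.pyRange 0 total_docs_without_user_docs 1).reverse).zip tail.reverse).foldl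
    (fun (d : PySem.Dict Int Int) p => d.insert p.1 p.2) PySem.Dict.empty).items

-- ===== PRECONDITION & SPEC =====
def Spec_get_masking_dict (total_docs_without_user_docs : Int) (user_docs : List Int) (out : List (Int × Int)) : Prop := out = get_masking_dict_alt total_docs_without_user_docs user_docs
instance (total_docs_without_user_docs : Int) (user_docs : List Int) (out : List (Int × Int)) : Decidable (Spec_get_masking_dict total_docs_without_user_docs user_docs out) := by unfold Spec_get_masking_dict; infer_instance

-- ===== CLAIM (what is proved, stated in full; the proofs are below) =====
def Claim_equal_get_masking_dict : Prop := ∀ (total_docs_without_user_docs : Int) (user_docs : List Int), Dom_get_masking_dict total_docs_without_user_docs user_docs → Spec_get_masking_dict total_docs_without_user_docs user_docs (get_masking_dict total_docs_without_user_docs user_docs)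

-- ===== LEMMAS AND PROOFS =====

-- the ascending list of indices 0..a that do not occur in ud
def pvFi (ud : List Int) (a : Int) : List Int :=
  ((List.range (a+1).toNat).map (fun (k : Nat) => (k:Int))).filter (fun x => !(ud.contains x))

-- A's loop as a plain recursion producing the items list (keys m-1, m-2, …, 0)
def pvAout (ud : List Int) : Nat → Int → List (Int × Int)
  | 0, _ => []
  | m+1, a =>
    let v := pySkip ud (ud.length + 1) a
    ((m : Int), v) :: pvAout ud m (v-1)

lemma pvFi_neg (ud : List Int) (a : Int) (h : a < 0) : pvFi ud a = [] := by
  unfold pvFi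
  have : (a+1).toNat = 0 := by omega
  simp [this]

lemma pvFi_succ (ud : List Int) (a : Int) (h : 0 ≤ a) :
    pvFi ud a = pvFi ud (a-1) ++ (if ud.contains a then [] else [a]) := by
  unfold pvFi
  have h1 : (a+1).toNat = (a-1+1).toNat + 1 := by omega
  have h3 : max a 0 = a := by omega
  rw [h1]
  simp [List.range_succ, List.filter_append, h3]
  split_ifs with hc <;> simp [hc]

lemma pvFilt_lt (l : List Int) (a : Int) (hn : l.Nodup) (ha : a ∈ l) :
    (l.filter (fun y => decide (y ≤ a - 1))).length <
    (l.filter (fun y => decide (y ≤ a))).length := by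
  induction l with
  | nil => simp at ha
  | cons b l ih =>
    rcases List.mem_cons.mp ha with rfl | hal
    · have hle : (l.filter (fun y => decide (y ≤ a - 1))).length ≤
          (l.filter (fun y => decide (y ≤ a))).length :=
        (List.monotone_filter_right l (fun x hx => by simp at hx ⊢; omega)).length_le
      rw [List.filter_cons, List.filter_cons]
      rw [if_neg (by simp), if_pos (by simp)]
      simp only [List.length_cons]; omega
    · have hih := ih hn.of_cons hal
      rw [List.filter_cons, List.filter_cons]
      split_ifs with hA hB hB
      all_goals simp only [List.length_cons, decide_eq_true_eq] at *
      all_goals omega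

lemma pvSkip_go (ud : List Int) : ∀ (fuel : Nat) (a : Int),
    (ud.dedup.filter (fun y => decide (y ≤ a))).length < fuel →
    ud.contains (pySkip ud fuel a) = false ∧ pySkip ud fuel a ≤ a ∧
    ∀ x, pySkip ud fuel a < x → x ≤ a → ud.contains x = true := by
  intro fuel
  induction fuel with
  | zero => intro a h; omega
  | succ fuel ih =>
    intro a h
    cases hc : ud.contains a with
    | true =>
      have ha : a ∈ ud := by simpa using hc
      have hd : a ∈ ud.dedup := List.mem_dedup.mpr ha
      have hlt := pvFilt_lt ud.dedup a (List.nodup_dedup ud) hd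
      obtain ⟨h1, h2, h3⟩ := ih (a-1) (by omega)
      have he : pySkip ud (fuel+1) a = pySkip ud fuel (a-1) := by
        simp only [pySkip, hc, if_true]
      rw [he]
      refine ⟨h1, by omega, ?_⟩
      intro x hx1 hx2
      by_cases hxa : x ≤ a - 1
      · exact h3 x hx1 hxa
      · have hxe : x = a := by omega
        rw [hxe]; exact hc
    | false =>
      have he : pySkip ud (fuel+1) a = a := by
        simp only [pySkip, hc, if_false, Bool.false_eq_true]
      rw [he]
      exact ⟨hc, le_rfl, fun x h1 h2 => absurd (lt_of_lt_of_le h1 h2) (lt_irrefl a)⟩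

lemma pvSkip_spec (ud : List Int) (a : Int) :
    ud.contains (pySkip ud (ud.length + 1) a) = false ∧
    pySkip ud (ud.length + 1) a ≤ a ∧
    ∀ x, pySkip ud (ud.length + 1) a < x → x ≤ a → ud.contains x = true := by
  apply pvSkip_go
  have h1 : (ud.dedup.filter (fun y => decide (y ≤ a))).length ≤ ud.dedup.length :=
    List.length_filter_le _ _
  have h2 : ud.dedup.length ≤ ud.length := ud.dedup_sublist.length_le
  omega

lemma pvFi_skip (ud : List Int) (k : Nat) (a : Int)
    (h : ∀ x : Int, a - k < x → x ≤ a → ud.contains x = true) :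
    pvFi ud a = pvFi ud (a - k) := by
  induction k generalizing a with
  | zero => simp
  | succ k ih =>
    rcases lt_or_ge a 0 with hneg | hpos
    · rw [pvFi_neg ud a hneg, pvFi_neg ud (a - (k+1:Nat)) (by omega)]
    · have hca : ud.contains a = true := h a (by push_cast; omega) le_rfl
      rw [pvFi_succ ud a hpos, hca]
      have hr := ih (a-1) (fun x hx1 hx2 => h x (by push_cast at hx1 ⊢; omega) (by omega))
      rw [hr]
      have he : a - 1 - (k:Int) = a - ((k+1:Nat):Int) := by push_cast; omega
      simp [he]

lemma pvFi_length_ge (ud : List Int) (a : Int) :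
    (a+1).toNat ≤ (pvFi ud a).length + ud.length := by
  unfold pvFi
  set base := (List.range (a+1).toNat).map (fun (k : Nat) => (k:Int)) with hb
  have hlen : base.length = (a+1).toNat := by simp [hb]
  have hsplit := (List.length_eq_length_filter_add (l := base) (fun x => ud.contains x)).symm
  have hnodup : base.Nodup :=
    List.Nodup.map (fun m n h => by exact_mod_cast h) List.nodup_range
  have hnf : (base.filter (fun x => ud.contains x)).Nodup := hnodup.filter _
  have hsub : (base.filter (fun x => ud.contains x)).toFinset ⊆ ud.toFinset := by
    intro x hx
    simp only [List.mem_toFinset] at hx ⊢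
    have := List.of_mem_filter hx
    simpa using this
  have hcard : (base.filter (fun x => ud.contains x)).length ≤ ud.length :=
    calc (base.filter (fun x => ud.contains x)).length
        = (base.filter (fun x => ud.contains x)).toFinset.card :=
          (List.toFinset_card_of_nodup hnf).symm
      _ ≤ ud.toFinset.card := Finset.card_le_card hsub
      _ ≤ ud.length := List.toFinset_card_le ud
  omega

lemma pvAout_eq (ud : List Int) (m : Nat) (a : Int) (h : m ≤ (pvFi ud a).length) :
    pvAout ud m a =
      ((List.range m).reverse.map (fun (k : Nat) => (k:Int))).zip
        (((pvFi ud a).drop ((pvFi ud a).length - m)).reverse) := by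
  induction m generalizing a with
  | zero => simp [pvAout]
  | succ m ih =>
    obtain ⟨h1, h2, h3⟩ := pvSkip_spec ud a
    set v := pySkip ud (ud.length + 1) a with hv
    have hFiv : pvFi ud a = pvFi ud v := by
      have hs := pvFi_skip ud (a - v).toNat a (fun x hx1 hx2 => h3 x (by omega) hx2)
      rwa [show a - ((a - v).toNat : Int) = v by omega] at hs
    have hv0 : 0 ≤ v := by
      by_contra hneg
      have hnil : pvFi ud v = [] := pvFi_neg ud v (by omega)
      rw [hFiv, hnil] at h; simp at h
    have hdec : pvFi ud a = pvFi ud (v-1) ++ [v] := by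
      rw [hFiv, pvFi_succ ud v hv0, h1]
      simp
    set W := pvFi ud (v-1) with hW
    have hlen : (pvFi ud a).length = W.length + 1 := by rw [hdec]; simp
    have hm : m ≤ W.length := by omega
    have hdrop : ((pvFi ud a).drop ((pvFi ud a).length - (m+1))) =
        (W.drop (W.length - m)) ++ [v] := by
      rw [hdec]
      simp only [List.length_append, List.length_cons, List.length_nil]
      have he : W.length + (0+1) - (m+1) = W.length - m := by omega
      rw [he, List.drop_append_of_le_length (by omega)]
    have hkeys : (List.range (m+1)).reverse = m :: (List.range m).reverse := by
      rw [List.range_succ, List.reverse_append]; simp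
    rw [hdrop, hkeys]
    simp only [List.map_cons, List.reverse_append, List.reverse_cons, List.reverse_nil,
      List.nil_append, List.cons_append, List.zip_cons_cons]
    show pvAout ud (m+1) a = ((m:Int), v) :: _
    rw [pvAout]
    simp only [← hv]
    rw [ih (v-1) hm]

-- A's dict-building fold equals pvAout (all inserted keys are fresh, so items append)
lemma pvFoldA (ud : List Int) (m : Nat) (d : PySem.Dict Int Int) (a : Int)
    (hd : ∀ k ∈ d.keys, (m:Int) ≤ k) :
    (((List.range m).reverse.map (fun (k : Nat) => (k:Int))).foldl
      (fun (st : PySem.Dict Int Int × Int) i =>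
        let actual_index := pySkip ud (ud.length + 1) st.2
        (st.1.insert i actual_index, actual_index - 1)) (d, a)).1.items
      = d.items ++ pvAout ud m a := by
  induction m generalizing d a with
  | zero => simp [pvAout]
  | succ m ih =>
    have hkeys : (List.range (m+1)).reverse = m :: (List.range m).reverse := by
      rw [List.range_succ, List.reverse_append]; simp
    rw [hkeys]
    simp only [List.map_cons, List.foldl_cons]
    have hfresh : d.contains ((m:Int)) = false := by
      cases hcon : d.contains ((m:Int)) with
      | false => rfl
      | true =>
        have hmem : (m:Int) ∈ d.keys := by
          rw [← PySem.Dict.contains_iff_mem_keys]; exact hcon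
        have := hd _ hmem
        omega
    set v := pySkip ud (ud.length + 1) a with hv
    have hrw := ih (d.insert ((m:Int)) v) (v-1) (by
      intro k hk
      rcases (PySem.Dict.mem_keys_insert _ _ _ _).mp hk with rfl | hk'
      · omega
      · have := hd k hk'
        omega)
    simp only [hrw, PySem.Dict.items_insert_of_not_contains d _ hfresh, pvAout]
    simp [← hv]

-- B's dict fold over pairs with fresh, pairwise-distinct keys is just the pairs list
lemma pvFoldB (ps : List (Int × Int)) (d : PySem.Dict Int Int)
    (hn : (ps.map Prod.fst).Nodup) (hf : ∀ p ∈ ps, d.contains p.1 = false) :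
    (ps.foldl (fun (d : PySem.Dict Int Int) p => d.insert p.1 p.2) d).items
      = d.items ++ ps := by
  induction ps generalizing d with
  | nil => simp
  | cons p ps ih =>
    simp only [List.foldl_cons]
    have hfresh : d.contains p.1 = false := hf p (List.mem_cons_self)
    have hrw := ih (d.insert p.1 p.2) (by simpa using hn.of_cons) (by
      intro q hq
      rw [PySem.Dict.contains_insert]
      have hne : q.1 ≠ p.1 := by
        intro he
        have : p.1 ∈ ps.map Prod.fst := he ▸ List.mem_map_of_mem hq
        exact (List.nodup_cons.mp (by simpa using hn)).1 this
      simp [hne, hf q (List.mem_cons_of_mem _ hq)])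
    rw [hrw, PySem.Dict.items_insert_of_not_contains d _ hfresh]
    simp

lemma pvKeys_eq (n : Int) :
    (PySem.List.pyRange 0 n 1).reverse =
      (List.range n.toNat).reverse.map (fun (k : Nat) => (k:Int)) := by
  rw [PySem.List.pyRange_one]
  have h0 : (n - 0).toNat = n.toNat := by omega
  rw [h0, ← List.map_reverse]
  simp

-- ===== VERDICT (by name: the statement is the Claim_ definition above) =====
theorem get_masking_dict_spec : Claim_equal_get_masking_dict := by
  intro n ud _
  unfold Spec_get_masking_dict get_masking_dict get_masking_dict_alt
  dsimp only
  rw [pvKeys_eq]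
  have hvalid : (PySem.List.pyRange 0 (n + (ud.length : Int)) 1).filter
      (fun x => !(ud.contains x)) = pvFi ud (n + (ud.length : Int) - 1) := by
    unfold pvFi
    rw [PySem.List.pyRange_one]
    have h1 : (n + (ud.length : Int) - 0).toNat = (n + (ud.length : Int) - 1 + 1).toNat := by
      omega
    rw [h1]
    simp
  rw [hvalid]
  by_cases hn : n ≤ 0
  · have h0 : n.toNat = 0 := by omega
    rw [h0]
    simp
  · set a0 : Int := n + (ud.length : Int) - 1 with ha0
    have hcnt := pvFi_length_ge ud a0
    have hNle : n.toNat ≤ (pvFi ud a0).length := by omega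
    have hnle : n ≤ ((pvFi ud a0).length : Int) := by omega
    rw [PySem.List.slice_from (pvFi ud a0) (a := ((pvFi ud a0).length : Int) - n) (by omega)]
    have htoNat : (((pvFi ud a0).length : Int) - n).toNat = (pvFi ud a0).length - n.toNat := by
      omega
    rw [htoNat]
    have hA := pvFoldA ud n.toNat PySem.Dict.empty a0 (by simp)
    rw [hA]
    set tail := (pvFi ud a0).drop ((pvFi ud a0).length - n.toNat) with htail
    have hklen : ((List.range n.toNat).reverse.map (fun (k : Nat) => (k:Int))).length = n.toNat := by
      simp
    have htlen : tail.length = n.toNat := by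
      rw [htail, List.length_drop]
      omega
    have hB := pvFoldB (((List.range n.toNat).reverse.map (fun (k : Nat) => (k:Int))).zip
        tail.reverse) PySem.Dict.empty
      (by
        rw [List.map_fst_zip (by simp [htlen])]
        exact List.Nodup.map (fun x y hxy => by exact_mod_cast hxy)
          (List.nodup_reverse.mpr List.nodup_range))
      (by intro p _; exact PySem.Dict.contains_empty p.1)
    rw [hB]
    rw [pvAout_eq ud n.toNat a0 hNle]
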